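-- pv_equiv track=rewrite | github.com/Vincent-Therrien/stelaro | stelaro/data/format.py | decode_tetramer
-- ===== SOURCE A (Python) =====
-- def decode_tetramer(sequence: list[int]) -> str:
--     """Convert a tetramer encoding into a nucleotide sequence.
--
--     Args:
--         sequence: 4-mer encoded sequence.
--
--     Returns: Nucleotide sequence.
--     """
--     bits_to_base = {
--         0b00: 'A',
--         0b01: 'C',
--         0b10: 'G',
--         0b11: 'T'
--     }
--
--     def decode_integer(integer):
--         tetramer = ''
--         for shift in (6, 4, 2, 0):
--             two_bits = (integer >> shift) & 0b11
--             tetramer += bits_to_base[two_bits]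
--         return tetramer
--
--     return "".join([decode_integer(i) for i in sequence])
-- ===== SOURCE B (Python) =====
-- _TABLE = [
--     "".join("ACGT"[(v >> shift) & 0b11] for shift in (6, 4, 2, 0))
--     for v in range(256)
-- ]
--
--
-- def decode_tetramer(sequence: list[int]) -> str:
--     """Convert a tetramer encoding into a nucleotide sequence.
--
--     Args:
--         sequence: 4-mer encoded sequence.
--
--     Returns: Nucleotide sequence.
--     """
--     return "".join(_TABLE[i & 0xFF] for i in sequence)
-- ===== Notes on version B (the rewrite author's own statement) =====
-- stated objective: faster
-- what changed: Replaces A's per-integer inner loop (four shift/mask steps and dict lookups, string concatenation per integer) with a 256-entry table precomputed once, so the body is a single pass doing one masked lookup per integer.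
import Mathlib
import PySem

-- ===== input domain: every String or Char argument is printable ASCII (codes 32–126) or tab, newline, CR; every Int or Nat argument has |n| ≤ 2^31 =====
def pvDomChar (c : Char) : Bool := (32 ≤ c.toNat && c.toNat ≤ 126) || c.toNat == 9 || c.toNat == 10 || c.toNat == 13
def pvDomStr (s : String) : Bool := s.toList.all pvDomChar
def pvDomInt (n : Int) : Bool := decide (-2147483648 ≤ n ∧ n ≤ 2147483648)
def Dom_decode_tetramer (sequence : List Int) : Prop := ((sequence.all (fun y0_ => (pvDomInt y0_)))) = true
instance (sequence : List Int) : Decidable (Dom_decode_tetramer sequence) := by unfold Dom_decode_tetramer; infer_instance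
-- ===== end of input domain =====

-- B replaces A's per-integer shift-and-dict loop by a precomputed 256-entry table indexed with i & 0xFF (idiomatic single pass).

-- ===== PORT A =====
def pvBitsToBase : PySem.Dict Int String :=
  ((((PySem.Dict.empty).insert 0 "A").insert 1 "C").insert 2 "G").insert 3 "T"

-- the key (integer >> shift) & 0b11 is always one of 0,1,2,3, all present in the dict,
-- so the lookup never misses and getD with default "" is exact (Python raises only on a missing key)
def pvDecodeInteger (integer : Int) : String :=
  ([6, 4, 2, 0] : List Nat).foldl
    (fun (tetramer : String) (shift : Nat) =>
      tetramer ++ PySem.Dict.getD pvBitsToBase (PySem.Int.band (integer >>> shift) 3) "")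
    ""

def decode_tetramer (sequence : List Int) : String :=
  PySem.Str.join "" (sequence.map (fun i => pvDecodeInteger i))

-- ===== PORT B =====
-- "ACGT"[(v >> shift) & 3]: the index is always 0..3, in range, so pyGet? never misses and getD 'A' is exact;
-- Source B's "".join over the four one-character strings is String.ofList of the four characters
def pvTableEntry (v : Nat) : String :=
  String.ofList (([6, 4, 2, 0] : List Nat).map
    (fun (shift : Nat) => (PySem.Str.pyGet? "ACGT" (PySem.Int.band ((v : Int) >>> shift) 3)).getD 'A'))

def pvTable : List String := (List.range 256).map pvTableEntry

-- _TABLE[i & 0xFF]: the index is always 0..255, in range, so getD "" is exact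
def decode_tetramer_alt (sequence : List Int) : String :=
  PySem.Str.join "" (sequence.map (fun i => pvTable.getD (PySem.Int.band i 255).toNat ""))

-- ===== PRECONDITION & SPEC =====
def Spec_decode_tetramer (sequence : List Int) (out : String) : Prop := out = decode_tetramer_alt sequence
instance (sequence : List Int) (out : String) : Decidable (Spec_decode_tetramer sequence out) := by unfold Spec_decode_tetramer; infer_instance

-- ===== CLAIM (what is proved, stated in full; the proofs are below) =====
def Claim_equal_decode_tetramer : Prop := ∀ (sequence : List Int), Dom_decode_tetramer sequence → Spec_decode_tetramer sequence (decode_tetramer sequence)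

-- ===== LEMMAS AND PROOFS =====

-- i & 255 is i mod 256 (Python-exact on negatives)
theorem pv_band_255 (i : Int) : PySem.Int.band i 255 = i % 256 := by
  by_cases hi : 0 ≤ i
  · rw [PySem.Int.band_of_nonneg hi (by norm_num)]
    have h1 : (255:Int).toNat = 255 := rfl
    rw [h1]
    have h2 : i.toNat &&& 255 = i.toNat % 256 := Nat.and_two_pow_sub_one_eq_mod i.toNat 8
    omega
  · simp only [PySem.Int.band]
    rw [if_neg hi, if_pos (by norm_num)]
    have h1 : (255:Int).toNat = 255 := rfl
    rw [h1]
    have h2 : 255 &&& (-i-1).toNat = (-i-1).toNat % 256 := by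
      rw [Nat.and_comm]; exact Nat.and_two_pow_sub_one_eq_mod _ 8
    omega

-- x & 3 is x mod 4 (Python-exact on negatives)
theorem pv_band_3 (i : Int) : PySem.Int.band i 3 = i % 4 := by
  by_cases hi : 0 ≤ i
  · rw [PySem.Int.band_of_nonneg hi (by norm_num)]
    have h1 : (3:Int).toNat = 3 := rfl
    rw [h1]
    have h2 : i.toNat &&& 3 = i.toNat % 4 := Nat.and_two_pow_sub_one_eq_mod i.toNat 2
    omega
  · simp only [PySem.Int.band]
    rw [if_neg hi, if_pos (by norm_num)]
    have h1 : (3:Int).toNat = 3 := rfl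
    rw [h1]
    have h2 : 3 &&& (-i-1).toNat = (-i-1).toNat % 4 := by
      rw [Nat.and_comm]; exact Nat.and_two_pow_sub_one_eq_mod _ 2
    omega

-- A's decode_integer reads only the low 8 bits of its argument
theorem pv_decode_mod256 (i : Int) : pvDecodeInteger (i % 256) = pvDecodeInteger i := by
  simp only [pvDecodeInteger, List.foldl, Int.shiftRight_eq_div_pow, pv_band_3]
  norm_num
  have h6 : i % 256 / 64 % 4 = i / 64 % 4 := by omega
  have h4 : i % 256 / 16 % 4 = i / 16 % 4 := by omega
  have h2 : i % 256 / 4 % 4 = i / 4 % 4 := by omega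
  rw [h6, h2, h4]

-- B's table entry agrees with A's decode_integer on every byte value
set_option maxRecDepth 8192 in
theorem pv_table_entry_eq : ∀ n : Nat, n < 256 → pvTableEntry n = pvDecodeInteger (n : Int) := by
  decide

-- ===== VERDICT (by name: the statement is the Claim_ definition above) =====
theorem decode_tetramer_spec : Claim_equal_decode_tetramer := by
  intro sequence _
  unfold Spec_decode_tetramer decode_tetramer decode_tetramer_alt
  congr 1
  apply List.map_congr_left
  intro i _
  have h0 : 0 ≤ i % 256 := Int.emod_nonneg i (by norm_num)
  have h1 : i % 256 < 256 := Int.emod_lt_of_pos i (by norm_num)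
  have hn : ((i % 256).toNat : Int) = i % 256 := Int.toNat_of_nonneg h0
  have hlt : (i % 256).toNat < 256 := by omega
  rw [pv_band_255, show pvTable = (List.range 256).map pvTableEntry from rfl,
      PySem.List.getD_map_range pvTableEntry 256 _ "" hlt,
      pv_table_entry_eq _ hlt, hn, pv_decode_mod256]
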